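-- pv_equiv track=rewrite | github.com/divyb/pdf-maestro | merge.py | parse_page_selection
-- ===== SOURCE A (Python) =====
-- def parse_page_selection(selection_str, total_pages):
--     """
--     Parse a page selection string and return a list of page indices (0-based)
--
--     Format:
--     - Blank or 'all': All pages
--     - '1,3,5-7': Include pages 1, 3, and 5 through 7
--     - '-1,-3': Exclude pages 1 and 3
--     - '-1-3': Exclude pages 1 through 3
--     """
--     # If empty or "all", include all pages
--     if not selection_str or selection_str.lower() == "all":
--         return list(range(total_pages))
--
--     # Start with all pages
--     all_pages = set(range(total_pages))
--     pages_to_include = set()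
--     pages_to_exclude = set()
--
--     # Parse each part of the selection (comma-separated)
--     for part in selection_str.split(','):
--         part = part.strip()
--         if not part:
--             continue
--
--         # Check if it's an exclusion
--         is_exclude = part.startswith('-')
--         if is_exclude:
--             part = part[1:]  # Remove the '-'
--
--         # Check if it's a range (contains a hyphen)
--         if '-' in part:
--             start, end = part.split('-', 1)
--             try:
--                 # Convert to 0-based indices
--                 start_idx = int(start) - 1 if start else 0
--                 end_idx = int(end) - 1 if end else total_pages - 1
--
--                 # Ensure valid page range
--                 start_idx = max(0, start_idx)
--                 end_idx = min(total_pages - 1, end_idx)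
--
--                 page_range = set(range(start_idx, end_idx + 1))
--
--                 if is_exclude:
--                     pages_to_exclude.update(page_range)
--                 else:
--                     pages_to_include.update(page_range)
--             except ValueError:
--                 # Invalid range, ignore
--                 continue
--         else:
--             # Single page
--             try:
--                 # Convert to 0-based index
--                 page_idx = int(part) - 1
--
--                 # Ensure valid page
--                 if 0 <= page_idx < total_pages:
--                     if is_exclude:
--                         pages_to_exclude.add(page_idx)
--                     else:
--                         pages_to_include.add(page_idx)
--             except ValueError:
--                 # Invalid page, ignore
--                 continue
--
--     # If specific includes were given, start with those
--     if pages_to_include: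
--         result = pages_to_include
--     else:
--         # Otherwise, start with all pages
--         result = all_pages
--
--     # Remove excluded pages
--     result -= pages_to_exclude
--
--     # Sort and return as a list
--     return sorted(result)
-- ===== SOURCE B (Python) =====
-- def parse_page_selection(selection_str, total_pages):
--     # Interval-record re-implementation: parse parts into include/exclude
--     # interval lists, then emit kept pages in one ordered pass.
--     if not selection_str or selection_str.lower() == "all":
--         return list(range(total_pages))
--
--     includes = []
--     excludes = []
--     for raw in selection_str.split(','):
--         part = raw.strip()
--         if not part:
--             continue
--         exclude = part.startswith('-')
--         if exclude:
--             part = part[1:]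
--         if '-' in part:
--             start, end = part.split('-', 1)
--             try:
--                 lo = max(0, (int(start) - 1) if start else 0)
--                 hi = min(total_pages - 1, (int(end) - 1) if end else total_pages - 1)
--             except ValueError:
--                 continue
--         else:
--             try:
--                 lo = hi = int(part) - 1
--             except ValueError:
--                 continue
--             if not (0 <= lo < total_pages):
--                 continue
--         (excludes if exclude else includes).append((lo, hi))
--
--     has_include = any(lo <= hi for lo, hi in includes)
--     result = []
--     for p in range(total_pages):
--         if (not has_include or any(lo <= p <= hi for lo, hi in includes)) \
--                 and not any(lo <= p <= hi for lo, hi in excludes):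
--             result.append(p)
--     return result
-- ===== Notes on version B (the rewrite author's own statement) =====
-- stated objective: alternative
-- what changed: B replaces A's three materialized page sets (all pages, includes, excludes) and the final sort by two lists of clamped include/exclude interval records plus one ordered pass over range(total_pages), so no sets are built and no sort is needed.
import Mathlib
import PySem

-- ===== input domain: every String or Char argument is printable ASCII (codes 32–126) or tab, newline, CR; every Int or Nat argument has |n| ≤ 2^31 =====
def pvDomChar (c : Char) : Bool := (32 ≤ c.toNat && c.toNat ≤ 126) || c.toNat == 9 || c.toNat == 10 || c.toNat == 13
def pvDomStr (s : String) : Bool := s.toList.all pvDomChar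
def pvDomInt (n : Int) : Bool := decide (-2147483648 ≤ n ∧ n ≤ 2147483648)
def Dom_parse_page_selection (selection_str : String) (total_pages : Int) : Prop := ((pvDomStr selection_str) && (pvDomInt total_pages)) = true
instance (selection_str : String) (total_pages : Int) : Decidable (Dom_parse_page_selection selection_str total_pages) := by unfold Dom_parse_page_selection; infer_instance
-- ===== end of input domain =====

-- B replaces A's three sets (all/include/exclude pages) and final sort by include/exclude
-- INTERVAL-record lists and one ordered pass over range(total_pages); objective: alternative decomposition.

-- ===== PORT A =====
-- one iteration of A's parsing loop over a comma part, acting on (pages_to_include, pages_to_exclude)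
def pvA_step (total_pages : Int) (st : PySem.Set Int × PySem.Set Int) (rawPart : String) :
    PySem.Set Int × PySem.Set Int :=
  let part := PySem.Str.strip rawPart
  if part = "" then st
  else
    let is_exclude := PySem.Str.startswith part "-"
    let part := if is_exclude then PySem.Str.slice part (some 1) none else part
    if PySem.Str.isIn "-" part then
      match PySem.Str.splitMax? part "-" 1 with
      | some [start, stop] =>
        match (if start = "" then some 0 else (PySem.Int.ofStr? start).map (fun n => n - 1)) with
        | none => st
        | some start_idx =>
          match (if stop = "" then some (total_pages - 1) else (PySem.Int.ofStr? stop).map (fun n => n - 1)) with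
          | none => st
          | some end_idx =>
            let start_idx := max 0 start_idx
            let end_idx := min (total_pages - 1) end_idx
            let page_range := PySem.Set.ofList (PySem.List.pyRange start_idx (end_idx + 1))
            if is_exclude then (st.1, PySem.Set.update st.2 page_range)
            else (PySem.Set.update st.1 page_range, st.2)
      | _ => st
    else
      match PySem.Int.ofStr? part with
      | none => st
      | some n =>
        let page_idx := n - 1
        if 0 ≤ page_idx ∧ page_idx < total_pages then
          if is_exclude then (st.1, PySem.Set.add st.2 page_idx)
          else (PySem.Set.add st.1 page_idx, st.2)
        else st
def parse_page_selection (selection_str : String) (total_pages : Int) : List Int :=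
  if selection_str = "" ∨ PySem.Str.lower selection_str = "all" then
    PySem.List.pyRange 0 total_pages
  else
    let all_pages := PySem.Set.ofList (PySem.List.pyRange 0 total_pages)
    let parts := (PySem.Str.split? selection_str ",").getD []
    let st := parts.foldl (pvA_step total_pages) (PySem.Set.empty, PySem.Set.empty)
    let result := if st.1.isEmpty then all_pages else st.1
    let result := PySem.Set.diff result st.2
    PySem.List.sorted result (fun x => x)


-- ===== PORT B =====
-- parse one comma part into none (skipped) or (exclude?, lo, hi), a clamped inclusive interval
def pvB_part (total_pages : Int) (raw : String) : Option (Bool × Int × Int) :=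
  let part := PySem.Str.strip raw
  if part = "" then none
  else
    let exclude := PySem.Str.startswith part "-"
    let part := if exclude then PySem.Str.slice part (some 1) none else part
    if PySem.Str.isIn "-" part then
      match PySem.Str.splitMax? part "-" 1 with
      | some [start, stop] =>
        match (if start = "" then some 0 else (PySem.Int.ofStr? start).map (fun n => n - 1)) with
        | none => none
        | some s =>
          match (if stop = "" then some (total_pages - 1) else (PySem.Int.ofStr? stop).map (fun n => n - 1)) with
          | none => none
          | some e => some (exclude, max 0 s, min (total_pages - 1) e)
      | _ => none
    else
      match PySem.Int.ofStr? part with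
      | none => none
      | some n =>
        if 0 ≤ n - 1 ∧ n - 1 < total_pages then some (exclude, n - 1, n - 1) else none
-- loop body collecting the interval records into (includes, excludes)
def pvB_step (total_pages : Int) (acc : List (Int × Int) × List (Int × Int)) (raw : String) :
    List (Int × Int) × List (Int × Int) :=
  match pvB_part total_pages raw with
  | none => acc
  | some (true, lo, hi) => (acc.1, acc.2 ++ [(lo, hi)])
  | some (false, lo, hi) => (acc.1 ++ [(lo, hi)], acc.2)

def parse_page_selection_alt (selection_str : String) (total_pages : Int) : List Int :=
  if selection_str = "" ∨ PySem.Str.lower selection_str = "all" then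
    PySem.List.pyRange 0 total_pages
  else
    let recs := ((PySem.Str.split? selection_str ",").getD []).foldl (pvB_step total_pages) ([], [])
    let hasInc := recs.1.any (fun r => decide (r.1 ≤ r.2))
    (PySem.List.pyRange 0 total_pages).foldl
      (fun out p =>
        if ((!hasInc || recs.1.any (fun r => decide (r.1 ≤ p ∧ p ≤ r.2)))
            && !(recs.2.any (fun r => decide (r.1 ≤ p ∧ p ≤ r.2))))
        then out ++ [p] else out) []


-- ===== PRECONDITION & SPEC =====
def Spec_parse_page_selection (selection_str : String) (total_pages : Int) (out : List Int) : Prop := out = parse_page_selection_alt selection_str total_pages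
instance (selection_str : String) (total_pages : Int) (out : List Int) : Decidable (Spec_parse_page_selection selection_str total_pages out) := by unfold Spec_parse_page_selection; infer_instance

-- ===== CLAIM (what is proved, stated in full; the proofs are below) =====
def Claim_equal_parse_page_selection : Prop := ∀ (selection_str : String) (total_pages : Int), Dom_parse_page_selection selection_str total_pages → Spec_parse_page_selection selection_str total_pages (parse_page_selection selection_str total_pages)

-- ===== LEMMAS AND PROOFS =====

-- every interval produced by pvB_part is clamped into [0, total_pages - 1]
lemma pvB_part_bounds (tp : Int) (raw : String) (b : Bool) (lo hi : Int)
    (h : pvB_part tp raw = some (b, lo, hi)) : 0 ≤ lo ∧ hi ≤ tp - 1 := by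
  simp only [pvB_part] at h
  repeat' split at h
  all_goals simp_all
  all_goals try omega

-- A's loop body adds exactly the pages covered by the interval pvB_part extracts
set_option maxHeartbeats 2000000 in
lemma pvA_step_eq (tp : Int) (st : PySem.Set Int × PySem.Set Int) (raw : String) :
    pvA_step tp st raw =
      match pvB_part tp raw with
      | none => st
      | some (false, lo, hi) =>
          (PySem.Set.update st.1 (PySem.Set.ofList (PySem.List.pyRange lo (hi + 1))), st.2)
      | some (true, lo, hi) =>
          (st.1, PySem.Set.update st.2 (PySem.Set.ofList (PySem.List.pyRange lo (hi + 1)))) := by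
  unfold pvA_step pvB_part
  dsimp only
  by_cases h1 : PySem.Str.strip raw = ""
  · rw [if_pos h1, if_pos h1]
  · rw [if_neg h1, if_neg h1]
    cases hex : PySem.Str.startswith (PySem.Str.strip raw) "-" <;>
      simp only [Bool.false_eq_true, if_false, if_true]
    · by_cases h2 : PySem.Str.isIn "-" (PySem.Str.strip raw) = true
      · rw [if_pos h2, if_pos h2]
        cases hsp : PySem.Str.splitMax? (PySem.Str.strip raw) "-" 1 with
        | none => rfl
        | some l =>
          rcases l with _ | ⟨start, _ | ⟨stop, _ | ⟨c, rest⟩⟩⟩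
          · rfl
          · rfl
          · dsimp only
            cases hs0 : (if start = "" then some 0 else (PySem.Int.ofStr? start).map (fun n => n - 1)) with
            | none => rfl
            | some sIdx =>
              dsimp only
              cases he0 : (if stop = "" then some (tp - 1) else (PySem.Int.ofStr? stop).map (fun n => n - 1)) with
              | none => rfl
              | some eIdx => rfl
          · rfl
      · rw [if_neg h2, if_neg h2]
        cases hn : PySem.Int.ofStr? (PySem.Str.strip raw) with
        | none => rfl
        | some n =>
          dsimp only
          by_cases h3 : 0 ≤ n - 1 ∧ n - 1 < tp
          · rw [if_pos h3, if_pos h3]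
            dsimp only
            rw [PySem.List.pyRange_one_singleton]
            rfl
          · rw [if_neg h3, if_neg h3]
    · by_cases h2 : PySem.Str.isIn "-" (PySem.Str.slice (PySem.Str.strip raw) (some 1) none) = true
      · rw [if_pos h2, if_pos h2]
        cases hsp : PySem.Str.splitMax? (PySem.Str.slice (PySem.Str.strip raw) (some 1) none) "-" 1 with
        | none => rfl
        | some l =>
          rcases l with _ | ⟨start, _ | ⟨stop, _ | ⟨c, rest⟩⟩⟩
          · rfl
          · rfl
          · dsimp only
            cases hs0 : (if start = "" then some 0 else (PySem.Int.ofStr? start).map (fun n => n - 1)) with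
            | none => rfl
            | some sIdx =>
              dsimp only
              cases he0 : (if stop = "" then some (tp - 1) else (PySem.Int.ofStr? stop).map (fun n => n - 1)) with
              | none => rfl
              | some eIdx => rfl
          · rfl
      · rw [if_neg h2, if_neg h2]
        cases hn : PySem.Int.ofStr? (PySem.Str.slice (PySem.Str.strip raw) (some 1) none) with
        | none => rfl
        | some n =>
          dsimp only
          by_cases h3 : 0 ≤ n - 1 ∧ n - 1 < tp
          · rw [if_pos h3, if_pos h3]
            dsimp only
            rw [PySem.List.pyRange_one_singleton]
            rfl
          · rw [if_neg h3, if_neg h3]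


-- fold invariant: A's include/exclude sets hold exactly the pages covered by B's interval lists,
-- A's include set stays duplicate-free, and B's include intervals stay clamped to [0, total_pages-1]
lemma pv_fold_inv (tp : Int) (ps : List String) :
    ∀ (I E : PySem.Set Int) (li le : List (Int × Int)),
    I.Nodup →
    (∀ x, x ∈ I ↔ ∃ r ∈ li, r.1 ≤ x ∧ x ≤ r.2) →
    (∀ x, x ∈ E ↔ ∃ r ∈ le, r.1 ≤ x ∧ x ≤ r.2) →
    (∀ r ∈ li, 0 ≤ r.1 ∧ r.2 ≤ tp - 1) →
    (ps.foldl (pvA_step tp) (I, E)).1.Nodup ∧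
    (∀ x, x ∈ (ps.foldl (pvA_step tp) (I, E)).1 ↔ ∃ r ∈ (ps.foldl (pvB_step tp) (li, le)).1, r.1 ≤ x ∧ x ≤ r.2) ∧
    (∀ x, x ∈ (ps.foldl (pvA_step tp) (I, E)).2 ↔ ∃ r ∈ (ps.foldl (pvB_step tp) (li, le)).2, r.1 ≤ x ∧ x ≤ r.2) ∧
    (∀ r ∈ (ps.foldl (pvB_step tp) (li, le)).1, 0 ≤ r.1 ∧ r.2 ≤ tp - 1) := by
  induction ps with
  | nil => intro I E li le hN hI hE hB; exact ⟨hN, hI, hE, hB⟩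
  | cons p ps ih =>
    intro I E li le hN hI hE hB
    simp only [List.foldl_cons]
    rw [pvA_step_eq]
    cases hp : pvB_part tp p with
    | none => simp only [pvB_step, hp]; exact ih I E li le hN hI hE hB
    | some t =>
      obtain ⟨b, lo, hi⟩ := t
      have hbd := pvB_part_bounds tp p b lo hi hp
      cases b with
      | false =>
        simp only [pvB_step, hp]
        apply ih
        · exact PySem.Set.nodup_update _ _ hN
        · intro x
          rw [PySem.Set.mem_update, PySem.Set.mem_ofList, PySem.List.mem_pyRange_one, hI x]
          constructor
          · rintro (⟨r, hr, h⟩ | h)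
            · exact ⟨r, List.mem_append_left _ hr, h⟩
            · exact ⟨(lo, hi), List.mem_append_right _ (List.mem_singleton_self _), by omega⟩
          · rintro ⟨⟨a, c⟩, hr, h⟩
            rcases List.mem_append.mp hr with hr | hr
            · exact Or.inl ⟨(a, c), hr, h⟩
            · obtain ⟨rfl, rfl⟩ := Prod.mk.injEq .. ▸ List.mem_singleton.mp hr
              right; omega
        · exact hE
        · intro r hr
          rcases List.mem_append.mp hr with hr | hr
          · exact hB r hr
          · rw [List.mem_singleton.mp hr]; omega
      | true =>
        simp only [pvB_step, hp]
        apply ih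
        · exact hN
        · exact hI
        · intro x
          rw [PySem.Set.mem_update, PySem.Set.mem_ofList, PySem.List.mem_pyRange_one, hE x]
          constructor
          · rintro (⟨r, hr, h⟩ | h)
            · exact ⟨r, List.mem_append_left _ hr, h⟩
            · exact ⟨(lo, hi), List.mem_append_right _ (List.mem_singleton_self _), by omega⟩
          · rintro ⟨⟨a, c⟩, hr, h⟩
            rcases List.mem_append.mp hr with hr | hr
            · exact Or.inl ⟨(a, c), hr, h⟩
            · obtain ⟨rfl, rfl⟩ := Prod.mk.injEq .. ▸ List.mem_singleton.mp hr
              right; omega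
        · exact hB


-- the two ports agree on every input
lemma pv_ports_eq : ∀ s tp, parse_page_selection s tp = parse_page_selection_alt s tp := by
  intro s tp
  unfold parse_page_selection parse_page_selection_alt
  by_cases hall : s = "" ∨ PySem.Str.lower s = "all"
  · rw [if_pos hall, if_pos hall]
  · rw [if_neg hall, if_neg hall]
    dsimp only
    obtain ⟨hN, hI, hE, hB⟩ := pv_fold_inv tp ((PySem.Str.split? s ",").getD [])
      PySem.Set.empty PySem.Set.empty [] [] List.nodup_nil (by simp [PySem.Set.empty])
      (by simp [PySem.Set.empty]) (by simp)
    set stA := ((PySem.Str.split? s ",").getD []).foldl (pvA_step tp) (PySem.Set.empty, PySem.Set.empty) with hstA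
    set stB := ((PySem.Str.split? s ",").getD []).foldl (pvB_step tp) ([], []) with hstB
    rw [PySem.List.foldl_append_if_eq_filter
      (p := fun p => ((!stB.1.any fun r => decide (r.1 ≤ r.2)) || stB.1.any fun r => decide (r.1 ≤ p ∧ p ≤ r.2)) && !(stB.2.any fun r => decide (r.1 ≤ p ∧ p ≤ r.2)))]
    rw [List.nil_append]
    by_cases hA1 : stA.1.isEmpty
    · rw [if_pos hA1]
      have hA1' : stA.1 = [] := List.isEmpty_iff.mp hA1
      have hnoInc : (stB.1.any fun r => decide (r.1 ≤ r.2)) = false := by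
        rw [List.any_eq_false]
        rintro ⟨a, c⟩ hr hd
        simp only [decide_eq_true_eq] at hd
        have := (hI a).mpr ⟨(a, c), hr, by omega⟩
        rw [hA1'] at this
        simp at this
      apply PySem.List.sorted_eq_of_perm_of_pairwise_lt
      · rw [List.perm_ext_iff_of_nodup
          (List.Nodup.filter _ (PySem.List.nodup_pyRange_one 0 tp))
          (PySem.Set.nodup_diff _ _ (PySem.Set.nodup_ofList _))]
        intro x
        rw [List.mem_filter, PySem.Set.mem_diff, PySem.Set.mem_ofList, hE x]
        simp only [hnoInc, Bool.not_false, Bool.true_or, Bool.true_and, Bool.not_eq_true',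
          List.any_eq_false, decide_eq_true_eq]
        push_neg
        tauto
      · exact List.Pairwise.filter _ (PySem.List.pairwise_lt_pyRange_one 0 tp)
    · rw [if_neg hA1]
      have hne : stA.1 ≠ [] := fun h => hA1 (by simp [h])
      obtain ⟨y, hy⟩ := List.exists_mem_of_ne_nil _ hne
      obtain ⟨⟨a, c⟩, hr, hyac⟩ := (hI y).mp hy
      have hasInc : (stB.1.any fun r => decide (r.1 ≤ r.2)) = true :=
        List.any_eq_true.mpr ⟨(a, c), hr, by simp only [decide_eq_true_eq]; omega⟩
      apply PySem.List.sorted_eq_of_perm_of_pairwise_lt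
      · rw [List.perm_ext_iff_of_nodup
          (List.Nodup.filter _ (PySem.List.nodup_pyRange_one 0 tp))
          (PySem.Set.nodup_diff _ _ hN)]
        intro x
        rw [List.mem_filter, PySem.Set.mem_diff, hI x, hE x, PySem.List.mem_pyRange_one]
        simp only [hasInc, Bool.not_true, Bool.false_or, Bool.and_eq_true, List.any_eq_true,
          decide_eq_true_eq, Bool.not_eq_true', List.any_eq_false]
        push_neg
        constructor
        · rintro ⟨hrange, ⟨r, hrm, hxr⟩, hnex⟩
          exact ⟨⟨r, hrm, hxr⟩, hnex⟩
        · rintro ⟨⟨r, hrm, hxr⟩, hnex⟩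
          have hbr := hB r hrm
          exact ⟨by omega, ⟨r, hrm, hxr⟩, hnex⟩
      · exact List.Pairwise.filter _ (PySem.List.pairwise_lt_pyRange_one 0 tp)

-- ===== VERDICT (by name: the statement is the Claim_ definition above) =====
theorem parse_page_selection_spec : Claim_equal_parse_page_selection := by
  intro selection_str total_pages _
  unfold Spec_parse_page_selection
  exact pv_ports_eq selection_str total_pages
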